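-- pv_equiv track=rewrite | github.com/KotisKotlyandii/lessons1 | ege22/182.py | f
-- ===== SOURCE A (Python) =====
-- def f(x):
--     k = x % 7
--     a,b = 0,0
--     while x > 0:
--         d = x % 7
--         if d == k:
--             a += 1
--         b += d
--         x //= 7
--     return a,b
-- ===== SOURCE B (Python) =====
-- def f(x):
--     if x <= 0:
--         return 0, 0
--     k = x % 7
--     a = 0
--     t = 0
--     p = 1
--     while p <= x:
--         if (x // p) % 7 == k:
--             a += 1
--         t += x // (p * 7)
--         p *= 7
--     return a, x - 6 * t
-- ===== Notes on version B (the rewrite author's own statement) =====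
-- stated objective: alternative
-- what changed: B never mutates x or extracts a digit stream: it scans digit positions with a growing power p, counting positions where (x//p)%7 equals the last digit, and obtains the digit sum by the closed-form identity digitsum(x) = x - 6*sum_{i>=1} x//7^i instead of adding digits.
import Mathlib
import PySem

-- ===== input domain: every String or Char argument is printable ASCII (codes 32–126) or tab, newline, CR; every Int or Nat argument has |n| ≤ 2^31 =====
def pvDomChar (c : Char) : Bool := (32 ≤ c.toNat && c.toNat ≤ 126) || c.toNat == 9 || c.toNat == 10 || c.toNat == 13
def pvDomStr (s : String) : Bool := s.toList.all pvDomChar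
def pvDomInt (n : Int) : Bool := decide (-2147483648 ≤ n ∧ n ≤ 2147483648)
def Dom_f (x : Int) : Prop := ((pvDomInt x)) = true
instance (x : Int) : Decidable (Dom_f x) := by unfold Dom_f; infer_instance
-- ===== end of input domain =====

-- B scans base-7 digit positions with a growing power p and gets the digit sum by the identity
-- digitsum(x) = x - 6*Σ_{i≥1} x//7^i, instead of A's digit-extraction loop; same cost.


-- ===== PORT A =====
def fLoop (x k a b : Int) : Int × Int :=
  if h : x > 0 then
    let d := PySem.Int.mod x 7
    fLoop (PySem.Int.floordiv x 7) k (if d = k then a + 1 else a) (b + d)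
  else (a, b)
termination_by x.toNat
decreasing_by
  rw [PySem.Int.floordiv_eq_ediv_of_pos (by omega)]
  omega

def f (x : Int) : Int × Int := fLoop x (PySem.Int.mod x 7) 0 0

-- ===== PORT B =====
-- the loop variable p is always 7^i; it is carried as the exponent i for termination
def gLoop (x k a t : Int) (i : Nat) : Int × Int :=
  if h : (7:Int) ^ i ≤ x then
    gLoop x k
      (if PySem.Int.mod (PySem.Int.floordiv x (7 ^ i)) 7 = k then a + 1 else a)
      (t + PySem.Int.floordiv x (7 ^ i * 7)) (i + 1)
  else (a, x - 6 * t)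
termination_by x.toNat + 1 - 7 ^ i
decreasing_by
  have h1 : ((7 ^ i : Nat) : Int) ≤ x := by push_cast; exact h
  have h2 : 7 ^ i ≤ x.toNat := by omega
  have h3 : 7 ^ i < 7 ^ (i + 1) :=
    Nat.pow_lt_pow_succ (by norm_num)
  omega

def f_alt (x : Int) : Int × Int :=
  if x ≤ 0 then (0, 0)
  else gLoop x (PySem.Int.mod x 7) 0 0 0

-- ===== PRECONDITION & SPEC =====
def Spec_f (x : Int) (out : Int × Int) : Prop := out = f_alt x
instance (x : Int) (out : Int × Int) : Decidable (Spec_f x out) := by unfold Spec_f; infer_instance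

-- ===== CLAIM (what is proved, stated in full; the proofs are below) =====
def Claim_equal_f : Prop := ∀ (x : Int), Dom_f x → Spec_f x (f x)

-- ===== LEMMAS AND PROOFS =====
-- proof-side reference: the base-7 digit list (least significant first)
def refDigits (x : Int) : List Int :=
  if h : x > 0 then PySem.Int.mod x 7 :: refDigits (PySem.Int.floordiv x 7) else []
termination_by x.toNat
decreasing_by
  rw [PySem.Int.floordiv_eq_ediv_of_pos (by omega)]
  omega

-- proof-side: Σ_{j≥1} x // 7^j (the tail vanishes once x // 7 = 0)
def refSig (x : Int) : Int :=
  if h : x > 0 then PySem.Int.floordiv x 7 + refSig (PySem.Int.floordiv x 7) else 0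
termination_by x.toNat
decreasing_by
  rw [PySem.Int.floordiv_eq_ediv_of_pos (by omega)]
  omega

theorem refDigits_sum (x : Int) (hx : 0 ≤ x) : (refDigits x).sum = x - 6 * refSig x := by
  fun_induction refDigits x with
  | case1 x h ih =>
    rw [refSig, dif_pos h]
    rw [PySem.Int.floordiv_eq_ediv_of_pos (by omega), PySem.Int.mod_eq_emod_of_pos (by omega)] at *
    rw [List.sum_cons, ih (by positivity)]
    have := Int.emod_add_ediv x 7
    omega
  | case2 x h =>
    rw [refSig, dif_neg h]; simp; omega

theorem fLoop_eq (x k a b : Int) :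
    fLoop x k a b = (a + ((refDigits x).count k : Int), b + (refDigits x).sum) := by
  fun_induction fLoop x k a b with
  | case1 x a b h d ih =>
    simp only [dite_eq_ite] at ih
    rw [refDigits, dif_pos h, ih]
    by_cases hd : d = k <;>
      simp [hd, List.count_cons, d] <;> omega
  | case2 x a b h =>
    rw [refDigits, dif_neg h]
    simp

theorem gLoop_eq (x k a t : Int) (i : Nat) (hx : 0 < x) :
    gLoop x k a t i =
      (a + ((refDigits (x / 7 ^ i)).count k : Int),
       x - 6 * t - 6 * refSig (x / 7 ^ i)) := by
  fun_induction gLoop x k a t i with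
  | case1 a t i h ih =>
    have hp : (0:Int) < 7 ^ i := by positivity
    have hy : (1:Int) ≤ x / 7 ^ i := Int.le_ediv_iff_mul_le hp |>.mpr (by omega)
    have hdiv : x / 7 ^ (i + 1) = x / 7 ^ i / 7 := by
      rw [pow_succ, Int.ediv_ediv_of_nonneg (by positivity)]
    simp only [dite_eq_ite] at ih
    rw [ih, hdiv]
    have hfd : PySem.Int.floordiv x (7 ^ i) = x / 7 ^ i :=
      PySem.Int.floordiv_eq_ediv_of_pos hp
    have hfd7 : PySem.Int.floordiv x (7 ^ i * 7) = x / 7 ^ i / 7 := by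
      rw [PySem.Int.floordiv_eq_ediv_of_pos (by positivity),
        Int.ediv_ediv_of_nonneg (by positivity)]
    have hmod : PySem.Int.mod (x / 7 ^ i) 7 = x / 7 ^ i % 7 :=
      PySem.Int.mod_eq_emod_of_pos (by norm_num)
    have hD : refDigits (x / 7 ^ i) = x / 7 ^ i % 7 :: refDigits (x / 7 ^ i / 7) := by
      rw [refDigits, dif_pos (by omega)]
      rw [PySem.Int.floordiv_eq_ediv_of_pos (by norm_num),
        PySem.Int.mod_eq_emod_of_pos (by norm_num)]
    have hS : refSig (x / 7 ^ i) = x / 7 ^ i / 7 + refSig (x / 7 ^ i / 7) := by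
      rw [refSig, dif_pos (by omega), PySem.Int.floordiv_eq_ediv_of_pos (by norm_num)]
    rw [hD, hS, hfd, hfd7, hmod]
    by_cases hk : x / 7 ^ i % 7 = k
    · simp [hk, List.count_cons]
      constructor <;> ring
    · simp [hk, List.count_cons]
      ring
  | case2 a t i h =>
    have hp : (0:Int) < 7 ^ i := by positivity
    have hy : x / 7 ^ i = 0 := Int.ediv_eq_zero_of_lt (by omega) (by omega)
    rw [hy]
    rw [show refDigits 0 = [] from by rw [refDigits, dif_neg (by omega)],
        show refSig 0 = 0 from by rw [refSig, dif_neg (by omega)]]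
    simp

theorem f_spec : Claim_equal_f := by
  intro x _
  unfold Spec_f f f_alt
  by_cases hx : x ≤ 0
  · rw [if_pos hx, fLoop, dif_neg (by omega)]
  · rw [if_neg hx, fLoop_eq, gLoop_eq x _ 0 0 0 (by omega)]
    rw [refDigits_sum x (by omega)]
    simp
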